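-- pv_equiv track=rewrite | github.com/Al-tekreeti/dataStructures_and_algorithms | sliding_window_techniques/contiguous_subarrays.py | getLongestSubArrayWithOnes
-- ===== SOURCE A (Python) =====
-- def getLongestSubArrayWithOnes(arr, K):
--     """
--     version1
--     """
--     w1, onesCount, maxLength = 0, 0, 0
--     for w2 in range(len(arr)):
--         if arr[w2] == 1:
--             onesCount += 1
--         if w2 - w1 + 1 -onesCount > K:
--             if arr[w1] == 1:
--                 onesCount -= 1
--             w1 += 1
--         maxLength = max(maxLength, w2 - w1 + 1)
--     return maxLength
-- ===== SOURCE B (Python) =====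
-- def getLongestSubArrayWithOnes(arr, K):
--     """Zero-position (gap) scan: widest span bracketing exactly K flippable elements."""
--     if K < 0:
--         return 0
--     Z = [i for i, x in enumerate(arr) if x != 1]
--     if len(Z) <= K:
--         return len(arr)
--     padded = [-1] + Z + [len(arr)]
--     best = 0
--     for i in range(len(Z) - K + 1):
--         best = max(best, padded[i + K + 1] - padded[i] - 1)
--     return best
-- ===== Notes on version B (the rewrite author's own statement) =====
-- stated objective: alternative
-- what changed: Replaces the sliding window over the whole array by a single scan over the list of non-one positions: with sentinels -1 and len(arr), the answer is the widest span bracketing exactly K flippable elements (len(arr) when there are at most K of them, 0 when K is negative).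
import Mathlib
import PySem

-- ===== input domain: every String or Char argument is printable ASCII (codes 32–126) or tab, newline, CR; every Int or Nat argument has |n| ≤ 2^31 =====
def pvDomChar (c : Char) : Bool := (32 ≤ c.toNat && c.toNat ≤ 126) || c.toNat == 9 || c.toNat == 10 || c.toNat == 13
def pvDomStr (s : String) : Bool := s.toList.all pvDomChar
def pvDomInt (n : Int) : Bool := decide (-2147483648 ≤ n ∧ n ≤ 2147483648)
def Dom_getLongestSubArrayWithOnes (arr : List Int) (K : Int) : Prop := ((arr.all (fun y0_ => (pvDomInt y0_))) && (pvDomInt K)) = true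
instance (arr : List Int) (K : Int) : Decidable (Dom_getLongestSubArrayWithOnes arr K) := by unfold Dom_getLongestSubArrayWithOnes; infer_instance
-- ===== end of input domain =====

-- B replaces A's sliding window over the array by a single scan over the list of non-one
-- positions (sentinel-bracketed spans holding exactly K flippable elements); same cost,
-- genuinely different traversal ("alternative").

-- ===== PORT A =====
def getLongestSubArrayWithOnes (arr : List Int) (K : Int) : Int :=
  ((PySem.List.pyRange 0 (arr.length : Int) 1).foldl
    (fun (st : Int × Int × Int) (w2 : Int) =>
      let w1 := st.1
      let onesCount := if PySem.List.pyGetD arr w2 0 = 1 then st.2.1 + 1 else st.2.1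
      let p : Int × Int :=
        if w2 - w1 + 1 - onesCount > K then
          ((if PySem.List.pyGetD arr w1 0 = 1 then onesCount - 1 else onesCount), w1 + 1)
        else (onesCount, w1)
      (p.2, p.1, max st.2.2 (w2 - p.2 + 1)))
    ((0 : Int), (0 : Int), (0 : Int))).2.2

-- ===== PORT B =====
def getLongestSubArrayWithOnes_alt (arr : List Int) (K : Int) : Int :=
  if K < 0 then 0
  else
    let Z : List Int := ((PySem.List.enumerate arr 0).filter (fun p => p.2 ≠ 1)).map (fun p => p.1)
    if (Z.length : Int) ≤ K then (arr.length : Int)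
    else
      let padded : List Int := (-1 : Int) :: Z ++ [(arr.length : Int)]
      (PySem.List.pyRange 0 ((Z.length : Int) - K + 1) 1).foldl
        (fun best i =>
          max best (PySem.List.pyGetD padded (i + K + 1) 0 - PySem.List.pyGetD padded i 0 - 1))
        0

-- ===== PRECONDITION & SPEC =====
def Spec_getLongestSubArrayWithOnes (arr : List Int) (K : Int) (out : Int) : Prop := out = getLongestSubArrayWithOnes_alt arr K
instance (arr : List Int) (K : Int) (out : Int) : Decidable (Spec_getLongestSubArrayWithOnes arr K out) := by unfold Spec_getLongestSubArrayWithOnes; infer_instance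

-- ===== CLAIM (what is proved, stated in full; the proofs are below) =====
def Claim_equal_getLongestSubArrayWithOnes : Prop := ∀ (arr : List Int) (K : Int), Dom_getLongestSubArrayWithOnes arr K → Spec_getLongestSubArrayWithOnes arr K (getLongestSubArrayWithOnes arr K)

-- ===== LEMMAS AND PROOFS =====

-- pvZc arr t = number of non-one entries among the first t entries of arr.
def pvZc (arr : List Int) (t : Nat) : Nat := (arr.take t).countP (fun x => decide (x ≠ 1))

-- Left pointer of A's sliding window after processing the first t indices.
def pvW1 (arr : List Int) (K : Int) : Nat → Nat
  | 0 => 0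
  | t + 1 =>
      let w := pvW1 arr K t
      if ((pvZc arr (t+1) : Int) - (pvZc arr w : Int) > K) then w + 1 else w

-- sorted list of the non-one positions (Nat shadow of B's Z)
def pvPos (arr : List Int) : List Nat := (List.range arr.length).filter (fun i => decide (arr.getD i 0 ≠ 1))

-- the sentinel-padded list of B, indexed as a function
def pvPad (arr : List Int) (j : Nat) : Int :=
  ((-1 : Int) :: (pvPos arr).map (Nat.cast : Nat → Int) ++ [(arr.length : Int)]).getD j 0

lemma pvZc_succ (arr : List Int) (t : Nat) (h : t < arr.length) :
    pvZc arr (t+1) = pvZc arr t + (if arr.getD t 0 ≠ 1 then 1 else 0) := by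
  rw [pvZc, pvZc, List.take_add_one, List.getElem?_eq_getElem h, List.countP_append,
    List.getD_eq_getElem arr 0 h]
  simp only [Option.toList_some, List.countP_cons, List.countP_nil]
  split <;> simp_all

lemma pvZc_mono (arr : List Int) {s t : Nat} (h : s ≤ t) : pvZc arr s ≤ pvZc arr t := by
  unfold pvZc
  have he : arr.take s = (arr.take t).take s := by
    rw [List.take_take, Nat.min_eq_left h]
  rw [he]
  exact List.Sublist.countP_le (List.take_sublist _ _)

lemma pvW1_le (arr : List Int) (K : Int) (t : Nat) : pvW1 arr K t ≤ t := by
  induction t with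
  | zero => simp [pvW1]
  | succ t ih => simp only [pvW1]; split <;> omega

lemma pvW1_mono_succ (arr : List Int) (K : Int) (t : Nat) :
    pvW1 arr K t ≤ pvW1 arr K (t+1) ∧ pvW1 arr K (t+1) ≤ pvW1 arr K t + 1 := by
  simp only [pvW1]; split <;> omega

-- the window length of A never decreases
lemma pvLen_mono (arr : List Int) (K : Int) {s t : Nat} (h : s ≤ t) :
    (s : Int) - pvW1 arr K s ≤ (t : Int) - pvW1 arr K t := by
  obtain ⟨k, rfl⟩ := Nat.exists_eq_add_of_le h
  clear h
  induction k with
  | zero => simp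
  | succ k ih =>
      have h1 := pvW1_mono_succ arr K (s + k)
      have h2 := pvW1_le arr K (s + k)
      have : (s + (k+1)) = (s + k) + 1 := by omega
      rw [this]
      push_cast
      push_cast at ih
      omega

lemma pvW1_all (arr : List Int) (K : Int) (hK : K < 0) (t : Nat) : pvW1 arr K t = t := by
  induction t with
  | zero => rfl
  | succ t ih =>
      have hm := pvZc_mono arr (show t ≤ t+1 by omega)
      have hK0 : ((pvZc arr (t+1) : Int) - (pvZc arr (pvW1 arr K t) : Int) > K) := by
        rw [ih]; omega
      simp only [pvW1, ih] at hK0 ⊢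
      rw [if_pos hK0]

-- a window with at most K non-ones keeps A's left pointer behind its start
lemma pvW1_le_of_valid (arr : List Int) (K : Int) {a b : Nat}
    (hv : (pvZc arr b : Int) - (pvZc arr a : Int) ≤ K) :
    pvW1 arr K b ≤ a := by
  have main : ∀ t, t ≤ b → pvW1 arr K t ≤ a := by
    intro t
    induction t with
    | zero => intro _; exact Nat.zero_le a
    | succ t ih =>
        intro h
        have hw := ih (by omega)
        by_cases hwa : pvW1 arr K t = a
        · simp only [pvW1]
          rw [if_neg]
          · omega
          · have hm := pvZc_mono arr (show t+1 ≤ b by omega)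
            rw [hwa]; omega
        · simp only [pvW1]; split <;> omega
  exact main b le_rfl

-- A's final window length is 0 or the length of some window with at most K non-ones
lemma pvLen_cases (arr : List Int) (K : Int) (t : Nat) :
    (t : Int) - pvW1 arr K t = 0 ∨
    ∃ a b : Nat, a ≤ b ∧ b ≤ t ∧ ((pvZc arr b : Int) - (pvZc arr a : Int) ≤ K) ∧
      (b : Int) - (a : Int) = (t : Int) - pvW1 arr K t := by
  induction t with
  | zero => left; simp [pvW1]
  | succ t ih =>
      by_cases hs : ((pvZc arr (t+1) : Int) - (pvZc arr (pvW1 arr K t) : Int) > K)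
      · have he : pvW1 arr K (t+1) = pvW1 arr K t + 1 := by
          simp only [pvW1]; rw [if_pos hs]
        rcases ih with h0 | ⟨a, b, h1, h2, h3, h4⟩
        · left; rw [he]; push_cast; omega
        · right
          refine ⟨a, b, h1, by omega, h3, ?_⟩
          rw [he]; push_cast; omega
      · have he : pvW1 arr K (t+1) = pvW1 arr K t := by
          simp only [pvW1]; rw [if_neg hs]
        right
        refine ⟨pvW1 arr K t, t+1, by have := pvW1_le arr K t; omega, le_rfl, by omega, ?_⟩
        rw [he]

lemma pvFilter_range_len (arr : List Int) : ∀ t, t ≤ arr.length →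
    ((List.range t).filter (fun i => decide (arr.getD i 0 ≠ 1))).length = pvZc arr t := by
  intro t
  induction t with
  | zero => intro _; simp [pvZc]
  | succ t ih =>
      intro h
      rw [List.range_succ, List.filter_append, List.length_append, ih (by omega),
        pvZc_succ arr t (by omega)]
      simp only [List.filter_cons, List.filter_nil]
      split <;> simp_all

lemma pvPos_length (arr : List Int) : (pvPos arr).length = pvZc arr arr.length :=
  pvFilter_range_len arr arr.length le_rfl

lemma pvPos_sorted (arr : List Int) : (pvPos arr).Pairwise (· < ·) :=
  List.Pairwise.filter _ (List.pairwise_lt_range)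

lemma pvPos_mem (arr : List Int) {i : Nat} :
    i ∈ pvPos arr ↔ i < arr.length ∧ arr.getD i 0 ≠ 1 := by
  simp [pvPos, List.mem_filter, List.mem_range]

lemma pvPos_filter_lt (arr : List Int) {t : Nat} (ht : t ≤ arr.length) :
    (pvPos arr).filter (fun i => decide (i < t))
      = (List.range t).filter (fun i => decide (arr.getD i 0 ≠ 1)) := by
  unfold pvPos
  rw [List.filter_filter]
  have hsplit : arr.length = t + (arr.length - t) := by omega
  rw [hsplit, List.range_add, List.filter_append]
  have h2 : ((List.range (arr.length - t)).map (t + ·)).filter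
      (fun i => decide (i < t) && decide (arr.getD i 0 ≠ 1)) = [] := by
    rw [List.filter_eq_nil_iff]
    intro a ha
    simp only [List.mem_map, List.mem_range] at ha
    obtain ⟨k, _, rfl⟩ := ha
    simp
  rw [h2, List.append_nil]
  apply List.filter_congr
  intro i hi
  simp only [List.mem_range] at hi
  simp [hi]

-- in a strictly sorted list, element j is < t iff more than j elements are < t
lemma pvSortedCount : ∀ (L : List Nat), L.Pairwise (· < ·) →
    ∀ j (hj : j < L.length) (t : Nat),
      (L[j] < t ↔ j < (L.filter (fun i => decide (i < t))).length) := by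
  intro L
  induction L with
  | nil => intro _ j hj; simp at hj
  | cons x L ih =>
      intro hp j hj t
      have hx := (List.pairwise_cons.mp hp).1
      have hL := (List.pairwise_cons.mp hp).2
      by_cases hxt : x < t
      · match j with
        | 0 => simp [hxt]
        | j + 1 =>
            simp only [List.getElem_cons_succ, List.filter_cons, hxt, decide_true,
              if_true, List.length_cons]
            rw [ih hL j (by simpa using hj) t]
            omega
      · have hnone : (L.filter (fun i => decide (i < t))).length = 0 := by
          rw [List.length_eq_zero_iff, List.filter_eq_nil_iff]
          intro a ha
          have := hx a ha
          simp only [decide_eq_true_eq]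
          omega
        have hcons : ((x :: L).filter (fun i => decide (i < t))).length = 0 := by
          rw [List.filter_cons]
          simp [hxt, hnone]
        match j with
        | 0 =>
            simp only [List.getElem_cons_zero, hcons]
            omega
        | j + 1 =>
            have hjL : j < L.length := by simpa using hj
            have hgt : ¬ L[j] < t := by
              have := hx L[j] (List.getElem_mem hjL)
              omega
            simp only [List.getElem_cons_succ, hcons]
            omega

lemma pvPos_lt_iff (arr : List Int) {j : Nat} (hj : j < (pvPos arr).length) {t : Nat}
    (ht : t ≤ arr.length) : (pvPos arr)[j] < t ↔ j < pvZc arr t := by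
  rw [pvSortedCount (pvPos arr) (pvPos_sorted arr) j hj t, pvPos_filter_lt arr ht,
    pvFilter_range_len arr t ht]

lemma pvPos_lt_len (arr : List Int) {j : Nat} (hj : j < (pvPos arr).length) :
    (pvPos arr)[j] < arr.length :=
  ((pvPos_mem arr).mp (List.getElem_mem hj)).1

lemma pvZc_pos (arr : List Int) {j : Nat} (hj : j < (pvPos arr).length) :
    pvZc arr ((pvPos arr)[j]) = j ∧ pvZc arr ((pvPos arr)[j] + 1) = j + 1 := by
  have hlt := pvPos_lt_len arr hj
  have hmem := (pvPos_mem arr).mp (List.getElem_mem hj)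
  have h1 : ¬ j < pvZc arr ((pvPos arr)[j]) := by
    rw [← pvPos_lt_iff arr hj (by omega)]
    omega
  have h2 : j < pvZc arr ((pvPos arr)[j] + 1) := by
    rw [← pvPos_lt_iff arr hj (by omega)]
    omega
  have h3 : pvZc arr ((pvPos arr)[j] + 1) = pvZc arr ((pvPos arr)[j]) + 1 := by
    rw [pvZc_succ arr _ hlt, if_pos hmem.2]
  omega

-- B's Z is the cast of pvPos
lemma pvZ_eq (arr : List Int) :
    ((PySem.List.enumerate arr 0).filter (fun p => p.2 ≠ 1)).map (fun p => p.1)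
      = (pvPos arr).map (Nat.cast : Nat → Int) := by
  rw [PySem.List.enumerate_eq_map_pyRange (d := 0), PySem.List.pyRange_one]
  simp only [List.map_map, List.filter_map, List.map_map]
  simp [Function.comp_def, PySem.List.pyGetD_natCast, PySem.List.len_eq, pvPos]

-- A's fold computes n - w1(n)
lemma pvA_inv (arr : List Int) (K : Int) : ∀ t, t ≤ arr.length →
    ((PySem.List.pyRange 0 (t : Int) 1).foldl
      (fun (st : Int × Int × Int) (w2 : Int) =>
        let w1 := st.1
        let onesCount := if PySem.List.pyGetD arr w2 0 = 1 then st.2.1 + 1 else st.2.1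
        let p : Int × Int :=
          if w2 - w1 + 1 - onesCount > K then
            ((if PySem.List.pyGetD arr w1 0 = 1 then onesCount - 1 else onesCount), w1 + 1)
          else (onesCount, w1)
        (p.2, p.1, max st.2.2 (w2 - p.2 + 1)))
      ((0 : Int), (0 : Int), (0 : Int)))
    = ((pvW1 arr K t : Int),
       ((t : Int) - pvW1 arr K t) - ((pvZc arr t : Int) - (pvZc arr (pvW1 arr K t) : Int)),
       (t : Int) - (pvW1 arr K t : Int)) := by
  intro t
  induction t with
  | zero => intro _; simp [pvW1, PySem.List.pyRange_one_eq_nil]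
  | succ t ih =>
      intro h
      have hcast : ((t + 1 : Nat) : Int) = (t : Int) + 1 := by push_cast; ring
      rw [hcast, PySem.List.pyRange_one_succ_right (by positivity), List.foldl_append,
        ih (by omega)]
      simp only [List.foldl_cons, List.foldl_nil]
      have hw := pvW1_le arr K t
      have hgt : PySem.List.pyGetD arr (t : Int) 0 = arr.getD t 0 := by
        simp [PySem.List.pyGetD_natCast]
      have hgw : PySem.List.pyGetD arr ((pvW1 arr K t : Nat) : Int) 0 = arr.getD (pvW1 arr K t) 0 := by
        simp [PySem.List.pyGetD_natCast]
      have hzt := pvZc_succ arr t (by omega)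
      have hzw := pvZc_succ arr (pvW1 arr K t) (by omega)
      have hones : (if PySem.List.pyGetD arr (t:Int) 0 = 1
            then (((t : Int) - pvW1 arr K t) - ((pvZc arr t : Int) - (pvZc arr (pvW1 arr K t) : Int))) + 1
            else (((t : Int) - pvW1 arr K t) - ((pvZc arr t : Int) - (pvZc arr (pvW1 arr K t) : Int))))
          = (((t : Int) + 1 - pvW1 arr K t) - ((pvZc arr (t+1) : Int) - (pvZc arr (pvW1 arr K t) : Int))) := by
        rw [hgt]
        by_cases h1 : arr.getD t 0 = 1
        · rw [if_pos h1]
          rw [hzt, if_neg (by simpa using h1)]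
          push_cast; ring
        · rw [if_neg h1]
          rw [hzt, if_pos h1]
          push_cast; ring
      rw [hones]
      by_cases hs : ((pvZc arr (t+1) : Int) - (pvZc arr (pvW1 arr K t) : Int) > K)
      · have hW : pvW1 arr K (t+1) = pvW1 arr K t + 1 := by
          simp only [pvW1]; rw [if_pos hs]
        rw [if_pos (by omega), hW]
        refine Prod.ext (by push_cast; ring) (Prod.ext ?_ ?_)
        · simp only []
          rw [hgw]
          by_cases h1 : arr.getD (pvW1 arr K t) 0 = 1
          · rw [if_pos h1, hzw, if_neg (by simpa using h1)]
            push_cast; ring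
          · rw [if_neg h1, hzw, if_pos h1]
            push_cast; ring
        · simp only []
          rw [max_eq_right (by omega)]
          push_cast
          ring
      · have hW : pvW1 arr K (t+1) = pvW1 arr K t := by
          simp only [pvW1]; rw [if_neg hs]
        rw [if_neg (by omega), hW]
        refine Prod.ext (by simp) (Prod.ext (by push_cast; ring) ?_)
        simp only []
        rw [max_eq_right (by omega)]
        ring

lemma pvA_eq (arr : List Int) (K : Int) :
    getLongestSubArrayWithOnes arr K = (arr.length : Int) - (pvW1 arr K arr.length : Int) := by
  unfold getLongestSubArrayWithOnes
  rw [pvA_inv arr K arr.length le_rfl]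

-- values of the padded list
lemma pvPad_zero (arr : List Int) : pvPad arr 0 = -1 := rfl

lemma pvPad_succ (arr : List Int) {j : Nat} (hj : j < (pvPos arr).length) :
    pvPad arr (j + 1) = ((pvPos arr)[j] : Int) := by
  unfold pvPad
  rw [List.getD_append _ _ _ _ (by simp; omega), List.getD_cons_succ,
    List.getD_eq_getElem?_getD, List.getElem?_map, List.getElem?_eq_getElem hj]
  simp

lemma pvPad_last (arr : List Int) :
    pvPad arr ((pvPos arr).length + 1) = (arr.length : Int) := by
  unfold pvPad
  rw [List.getD_append_right _ _ _ _ (by simp)]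
  simp

-- candidate span j of B is realized by a window with at most K non-ones
def pvG (arr : List Int) (Kn : Nat) (j : Nat) : Int :=
  pvPad arr (j + Kn + 1) - pvPad arr j - 1

lemma pvCand (arr : List Int) (K : Int) (hK0 : 0 ≤ K)
    {j : Nat} (hj : j ≤ (pvPos arr).length - K.toNat) (hKm : K.toNat < (pvPos arr).length) :
    ∃ a b : Nat, b ≤ arr.length ∧ ((pvZc arr b : Int) - (pvZc arr a : Int) ≤ K) ∧
      (b : Int) - (a : Int) = pvG arr K.toNat j := by
  have hKn : (K.toNat : Int) = K := Int.toNat_of_nonneg hK0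
  obtain ⟨a, hpadj, hzca⟩ : ∃ a : Nat, pvPad arr j = (a : Int) - 1 ∧ pvZc arr a = j := by
    cases j with
    | zero => exact ⟨0, by simp [pvPad_zero], by simp [pvZc]⟩
    | succ j' =>
        have hj' : j' < (pvPos arr).length := by omega
        refine ⟨(pvPos arr)[j'] + 1, ?_, (pvZc_pos arr hj').2⟩
        rw [pvPad_succ arr hj']
        push_cast; ring
  obtain ⟨b, hbn, hpadb, hzcb⟩ : ∃ b : Nat, b ≤ arr.length ∧
      pvPad arr (j + K.toNat + 1) = (b : Int) ∧ pvZc arr b = j + K.toNat := by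
    by_cases hbc : j + K.toNat = (pvPos arr).length
    · refine ⟨arr.length, le_rfl, ?_, ?_⟩
      · rw [hbc, pvPad_last]
      · rw [← pvPos_length, hbc]
    · have hlt : j + K.toNat < (pvPos arr).length := by omega
      exact ⟨(pvPos arr)[j + K.toNat], Nat.le_of_lt (pvPos_lt_len arr hlt),
        by rw [pvPad_succ arr hlt], (pvZc_pos arr hlt).1⟩
  refine ⟨a, b, hbn, ?_, ?_⟩
  · rw [hzca, hzcb]; push_cast; omega
  · unfold pvG
    rw [hpadb, hpadj]; ring

-- every window with at most K non-ones fits inside some candidate span of B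
lemma pvBound (arr : List Int) (K : Int) (hK0 : 0 ≤ K) (hKm : K.toNat < (pvPos arr).length)
    {a b : Nat} (hab : a ≤ b) (hbn : b ≤ arr.length)
    (hv : (pvZc arr b : Int) - (pvZc arr a : Int) ≤ K) :
    ∃ j : Nat, j ≤ (pvPos arr).length - K.toNat ∧ (b : Int) - (a : Int) ≤ pvG arr K.toNat j := by
  have hKn : (K.toNat : Int) = K := Int.toNat_of_nonneg hK0
  have han : a ≤ arr.length := le_trans hab hbn
  have hzam : pvZc arr a ≤ (pvPos arr).length := by
    rw [pvPos_length]; exact pvZc_mono arr han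
  have hzbm : pvZc arr b ≤ (pvPos arr).length := by
    rw [pvPos_length]; exact pvZc_mono arr hbn
  refine ⟨min (pvZc arr a) ((pvPos arr).length - K.toNat), min_le_right _ _, ?_⟩
  set j := min (pvZc arr a) ((pvPos arr).length - K.toNat) with hjdef
  have hjm : j ≤ (pvPos arr).length - K.toNat := min_le_right _ _
  have hpja : pvPad arr j + 1 ≤ (a : Int) := by
    by_cases hj0 : j = 0
    · rw [hj0, pvPad_zero]
      have : (0 : Int) ≤ (a : Int) := by positivity
      omega
    · have hj1 : j - 1 < (pvPos arr).length := by omega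
      have hps := pvPad_succ arr hj1
      rw [show j = (j-1)+1 by omega, hps]
      have hlt := (pvPos_lt_iff arr hj1 (t := a) han).mpr (by omega)
      omega
  have hpb : (b : Int) ≤ pvPad arr (j + K.toNat + 1) := by
    by_cases hbc : j + K.toNat = (pvPos arr).length
    · rw [hbc, pvPad_last]
      exact_mod_cast hbn
    · have hlt : j + K.toNat < (pvPos arr).length := by omega
      rw [pvPad_succ arr hlt]
      have hnlt : ¬ ((pvPos arr)[j + K.toNat] < b) := by
        rw [pvPos_lt_iff arr hlt (t := b) hbn]
        omega
      omega
  unfold pvG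
  omega

-- ===== VERDICT (by name: the statement is the Claim_ definition above) =====
theorem getLongestSubArrayWithOnes_spec : Claim_equal_getLongestSubArrayWithOnes := by
  unfold Claim_equal_getLongestSubArrayWithOnes
  intro arr K _
  unfold Spec_getLongestSubArrayWithOnes getLongestSubArrayWithOnes_alt
  by_cases hK : K < 0
  · rw [if_pos hK, pvA_eq, pvW1_all arr K hK]
    ring
  · have hK0 : 0 ≤ K := by omega
    rw [if_neg hK]
    simp only [pvZ_eq arr, List.length_map]
    by_cases hmK : (((pvPos arr).length : Int) ≤ K)
    · rw [if_pos hmK, pvA_eq]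
      have hzn : (pvZc arr arr.length : Int) - (pvZc arr 0 : Int) ≤ K := by
        rw [← pvPos_length]
        simp [pvZc]
        omega
      have h0 : pvW1 arr K arr.length = 0 :=
        Nat.le_zero.mp (pvW1_le_of_valid arr K hzn)
      rw [h0]
      simp
    · rw [if_neg hmK]
      have hKn : (K.toNat : Int) = K := Int.toNat_of_nonneg hK0
      have hKm : K.toNat < (pvPos arr).length := by omega
      -- turn B's fold into a fold of pvG over a Nat range
      have hrange : PySem.List.pyRange 0 (((pvPos arr).length : Int) - K + 1) 1
          = (List.range ((pvPos arr).length - K.toNat + 1)).map (Nat.cast : Nat → Int) := by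
        rw [PySem.List.pyRange_one]
        have h1 : ((((pvPos arr).length : Int) - K + 1) - 0).toNat
            = (pvPos arr).length - K.toNat + 1 := by omega
        rw [h1]
        apply List.map_congr_left
        intro k _
        simp
      rw [hrange, List.foldl_map]
      have hfun : ∀ j ∈ List.range ((pvPos arr).length - K.toNat + 1), ∀ best : Int,
          max best (PySem.List.pyGetD ((-1 : Int) :: (pvPos arr).map (Nat.cast : Nat → Int) ++ [(arr.length : Int)]) ((j : Int) + K + 1) 0
            - PySem.List.pyGetD ((-1 : Int) :: (pvPos arr).map (Nat.cast : Nat → Int) ++ [(arr.length : Int)]) (j : Int) 0 - 1)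
          = max best (pvG arr K.toNat j) := by
        intro j _ best
        have hc : ((j : Int) + K + 1) = ((j + K.toNat + 1 : Nat) : Int) := by push_cast; omega
        rw [hc, PySem.List.pyGetD_natCast, PySem.List.pyGetD_natCast]
        rfl
      have hfold : (List.range ((pvPos arr).length - K.toNat + 1)).foldl
          (fun best (j : Nat) =>
            max best (PySem.List.pyGetD ((-1 : Int) :: (pvPos arr).map (Nat.cast : Nat → Int) ++ [(arr.length : Int)]) ((j : Int) + K + 1) 0
              - PySem.List.pyGetD ((-1 : Int) :: (pvPos arr).map (Nat.cast : Nat → Int) ++ [(arr.length : Int)]) (j : Int) 0 - 1)) 0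
          = (List.range ((pvPos arr).length - K.toNat + 1)).foldl
              (fun best j => max best (pvG arr K.toNat j)) 0 :=
        PySem.List.foldl_congr_mem _ _ _ 0 (fun acc x hx => hfun x hx acc)
      rw [hfold]
      have hmax := PySem.List.le_foldl_max_int (List.range ((pvPos arr).length - K.toNat + 1)) (pvG arr K.toNat) 0
      apply le_antisymm
      · rw [pvA_eq]
        rcases pvLen_cases arr K arr.length with h0 | ⟨a, b, hab, hbt, hv, hlen⟩
        · rw [h0]; exact hmax.1
        · obtain ⟨j, hjm, hle⟩ := pvBound arr K hK0 hKm hab hbt hv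
          have hjmem : j ∈ List.range ((pvPos arr).length - K.toNat + 1) := by
            rw [List.mem_range]; omega
          calc (arr.length : Int) - pvW1 arr K arr.length = (b : Int) - (a : Int) := hlen.symm
            _ ≤ pvG arr K.toNat j := hle
            _ ≤ _ := hmax.2 j hjmem
      · have hmem := PySem.List.foldl_max_mem
          ((List.range ((pvPos arr).length - K.toNat + 1)).map (pvG arr K.toNat)) 0
        rw [List.foldl_map] at hmem
        rw [pvA_eq]
        have hA0 : (0 : Int) ≤ (arr.length : Int) - pvW1 arr K arr.length := by
          have := pvW1_le arr K arr.length
          omega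
        rcases hmem with h0 | hmem
        · rw [h0]; exact hA0
        · obtain ⟨j, hjmem, heq⟩ := List.mem_map.mp hmem
          rw [List.mem_range] at hjmem
          obtain ⟨a, b, hbn, hv, hlen⟩ := pvCand arr K hK0 (j := j) (by omega) hKm
          have hw := pvW1_le_of_valid arr K hv
          calc (List.range ((pvPos arr).length - K.toNat + 1)).foldl
                (fun acc j => max acc (pvG arr K.toNat j)) 0
              = pvG arr K.toNat j := heq.symm
            _ = (b : Int) - (a : Int) := hlen.symm
            _ ≤ (b : Int) - (pvW1 arr K b : Int) := by omega
            _ ≤ _ := pvLen_mono arr K hbn
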